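-- pv_equiv track=rewrite | github.com/schroeti/tpfood-gym | agents/AC_model_final.py | decode_positions
-- ===== SOURCE A (Python) =====
-- def decode_positions(states):
--     """
--     Gets a state from env.render() (int) and returns
--     the taxi position (row, col), the passenger position
--     and the destination location
--     :param states: a list of states represented as integers [0-499]
--     :return: taxi_row, taxi_col, pass_code, dest_idx
--     """
--     dest_loc_1 = [state % 5 for state in states]
--     states = [state // 5 for state in states]
--     pass_code_1 = [state % 6 for state in states]
--     states = [state // 6 for state in states]
--     dest_loc_2 = [state % 5 for state in states]
--     states = [state // 5 for state in states]
--     pass_code_2 = [state % 6 for state in states]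
--     states = [state // 6 for state in states]
--     taxi_col = [state % 5 for state in states]
--     states = [state // 5 for state in states]
--     taxi_row = states
--     return taxi_row, taxi_col, pass_code_1, dest_loc_1, pass_code_2, dest_loc_2
-- ===== SOURCE B (Python) =====
-- def decode_positions(states):
--     # Closed-form place-value decode: each component is (s // weight) % base
--     # of the ORIGINAL state, using precomputed mixed-radix weights
--     # (1,5,30,150,900,4500) -- no sequential re-division of the list.
--     taxi_row    = [s // 4500 for s in states]
--     taxi_col    = [(s // 900) % 5 for s in states]
--     pass_code_1 = [(s // 5) % 6 for s in states]
--     dest_loc_1  = [s % 5 for s in states]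
--     pass_code_2 = [(s // 150) % 6 for s in states]
--     dest_loc_2  = [(s // 30) % 5 for s in states]
--     return taxi_row, taxi_col, pass_code_1, dest_loc_1, pass_code_2, dest_loc_2
-- ===== Notes on version B (the rewrite author's own statement) =====
-- stated objective: alternative
-- what changed: Replaces A's chained decode (repeatedly rebuilding the states list with // and taking the next digit of the quotient) with independent closed-form place-value extraction: each component is computed directly from the original state as (s // weight) % base with precomputed mixed-radix weights 1,5,30,150,900,4500, valid because floor division nests ((s//a)//b == s//(a*b) for positive a,b).
import Mathlib
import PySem

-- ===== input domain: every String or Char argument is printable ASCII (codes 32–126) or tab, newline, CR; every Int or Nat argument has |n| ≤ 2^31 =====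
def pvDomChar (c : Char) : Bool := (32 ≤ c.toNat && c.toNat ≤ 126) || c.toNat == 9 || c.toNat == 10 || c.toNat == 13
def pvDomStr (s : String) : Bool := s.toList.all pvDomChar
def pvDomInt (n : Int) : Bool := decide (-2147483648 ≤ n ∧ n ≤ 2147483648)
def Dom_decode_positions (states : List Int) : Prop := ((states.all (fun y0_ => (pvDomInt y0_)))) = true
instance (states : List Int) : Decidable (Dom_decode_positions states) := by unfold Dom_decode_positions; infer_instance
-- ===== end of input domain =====

-- ===== PORT A =====
-- literal port of A: six comprehension passes, rebuilding the states list between them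
def decode_positions (states : List Int) : List Int × List Int × List Int × List Int × List Int × List Int :=
  let dest_loc_1 := states.map (fun s => PySem.Int.mod s 5)
  let states1 := states.map (fun s => PySem.Int.floordiv s 5)
  let pass_code_1 := states1.map (fun s => PySem.Int.mod s 6)
  let states2 := states1.map (fun s => PySem.Int.floordiv s 6)
  let dest_loc_2 := states2.map (fun s => PySem.Int.mod s 5)
  let states3 := states2.map (fun s => PySem.Int.floordiv s 5)
  let pass_code_2 := states3.map (fun s => PySem.Int.mod s 6)
  let states4 := states3.map (fun s => PySem.Int.floordiv s 6)
  let taxi_col := states4.map (fun s => PySem.Int.mod s 5)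
  let states5 := states4.map (fun s => PySem.Int.floordiv s 5)
  (states5, taxi_col, pass_code_1, dest_loc_1, pass_code_2, dest_loc_2)

-- ===== PORT B =====
-- port of B: closed-form place-value extraction, each component directly from the
-- original state via precomputed mixed-radix weights 1,5,30,150,900,4500
def decode_positions_alt (states : List Int) : List Int × List Int × List Int × List Int × List Int × List Int :=
  let taxi_row := states.map (fun s => PySem.Int.floordiv s 4500)
  let taxi_col := states.map (fun s => PySem.Int.mod (PySem.Int.floordiv s 900) 5)
  let pass_code_1 := states.map (fun s => PySem.Int.mod (PySem.Int.floordiv s 5) 6)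
  let dest_loc_1 := states.map (fun s => PySem.Int.mod s 5)
  let pass_code_2 := states.map (fun s => PySem.Int.mod (PySem.Int.floordiv s 150) 6)
  let dest_loc_2 := states.map (fun s => PySem.Int.mod (PySem.Int.floordiv s 30) 5)
  (taxi_row, taxi_col, pass_code_1, dest_loc_1, pass_code_2, dest_loc_2)

-- ===== PRECONDITION & SPEC =====
def Spec_decode_positions (states : List Int) (out : List Int × List Int × List Int × List Int × List Int × List Int) : Prop := out = decode_positions_alt states
instance (states : List Int) (out : List Int × List Int × List Int × List Int × List Int × List Int) : Decidable (Spec_decode_positions states out) := by unfold Spec_decode_positions; infer_instance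

-- ===== CLAIM (what is proved, stated in full; the proofs are below) =====
def Claim_equal_decode_positions : Prop := ∀ (states : List Int), Dom_decode_positions states → Spec_decode_positions states (decode_positions states)

-- ===== LEMMAS AND PROOFS =====
theorem fdiv_fdiv (s : Int) (a b c : Int) (ha : 0 < a) (hb : 0 < b) (hc : a * b = c) :
    PySem.Int.floordiv (PySem.Int.floordiv s a) b = PySem.Int.floordiv s c := by
  subst hc
  rw [PySem.Int.floordiv_eq_ediv_of_pos ha, PySem.Int.floordiv_eq_ediv_of_pos hb,
      PySem.Int.floordiv_eq_ediv_of_pos (by positivity)]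
  exact Int.ediv_ediv_of_nonneg (le_of_lt ha)

-- ===== VERDICT (by name: the statement is the Claim_ definition above) =====
theorem decode_positions_spec : Claim_equal_decode_positions := by
  intro states _
  unfold Spec_decode_positions decode_positions decode_positions_alt
  refine Prod.ext ?_ (Prod.ext ?_ (Prod.ext ?_ (Prod.ext ?_ (Prod.ext ?_ ?_)))) <;>
    simp only [List.map_map] <;>
    refine List.map_congr_left (fun s _ => ?_) <;>
    simp only [Function.comp] <;>
    simp only [fdiv_fdiv s 5 6 30 (by norm_num) (by norm_num) (by norm_num),
      fdiv_fdiv s 30 5 150 (by norm_num) (by norm_num) (by norm_num),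
      fdiv_fdiv s 150 6 900 (by norm_num) (by norm_num) (by norm_num),
      fdiv_fdiv s 900 5 4500 (by norm_num) (by norm_num) (by norm_num)]
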